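-- pv_equiv track=rewrite | github.com/Shreyas-rao17/bt-coding-challenges | problems/challenge19/solution.py | generate_series
-- ===== SOURCE A (Python) =====
-- def generate_series(n):
--     """
--     Generate squares of even numbers up to n.
--     """
--     series = []
--     i = 1
--     while True:
--         term = (2 * i) ** 2
--         if term > n:
--             break
--         series.append(term)
--         i += 1
--     return series
-- ===== SOURCE B (Python) =====
-- def generate_series(n):
--     """
--     Generate squares of even numbers up to n.
--     """
--     if n < 4:
--         return []
--     m = n // 4
--     # integer square root of m by binary search: lo = largest i with i*i <= m
--     lo, hi = 1, m + 1
--     while lo + 1 < hi: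
--         mid = (lo + hi) // 2
--         if mid * mid <= m:
--             lo = mid
--         else:
--             hi = mid
--     return [4 * i * i for i in range(1, lo + 1)]
-- ===== Notes on version B (the rewrite author's own statement) =====
-- stated objective: alternative
-- what changed: B computes the term count up front as the integer square root of n//4 (binary search) and emits the list in one determined comprehension, instead of A's open-ended while loop testing each candidate term against n.
import Mathlib
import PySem

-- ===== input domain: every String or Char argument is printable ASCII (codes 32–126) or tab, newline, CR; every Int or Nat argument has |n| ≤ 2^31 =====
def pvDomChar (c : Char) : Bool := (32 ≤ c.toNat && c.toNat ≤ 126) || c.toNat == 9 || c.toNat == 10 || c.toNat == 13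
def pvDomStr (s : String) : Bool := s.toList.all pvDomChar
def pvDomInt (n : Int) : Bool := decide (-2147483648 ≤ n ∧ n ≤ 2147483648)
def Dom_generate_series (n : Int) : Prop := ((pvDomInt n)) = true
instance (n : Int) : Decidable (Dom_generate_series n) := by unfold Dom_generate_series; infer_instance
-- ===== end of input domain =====

-- B replaces A's test-each-term while-loop by computing the number of terms up front
-- (integer square root of n//4 via binary search) and emitting the list in one determined pass.

-- ===== PORT A =====
-- A's 'while True' loop; the fuel only makes the recursion total (n.toNat + 1 steps
-- always suffice, since the loop stops once (2*i)^2 > n).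
def genLoop (fuel : Nat) (n i : Int) (acc : List Int) : List Int :=
  match fuel with
  | 0 => acc
  | f + 1 =>
    let term := (2 * i) ^ 2
    if term > n then acc
    else genLoop f n (i + 1) (acc ++ [term])

def generate_series (n : Int) : List Int := genLoop (n.toNat + 1) n 1 []

-- ===== PORT B =====
-- Source B's binary-search integer square root; fuel = initial interval width suffices.
def isqrtLoop (fuel : Nat) (m lo hi : Int) : Int :=
  match fuel with
  | 0 => lo
  | f + 1 =>
    if lo + 1 < hi then
      let mid := PySem.Int.floordiv (lo + hi) 2
      if mid * mid ≤ m then isqrtLoop f m mid hi else isqrtLoop f m lo mid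
    else lo

def generate_series_alt (n : Int) : List Int :=
  if n < 4 then []
  else
    let m := PySem.Int.floordiv n 4
    let lo := isqrtLoop (m.toNat + 1) m 1 (m + 1)
    (PySem.List.pyRange 1 (lo + 1) 1).map (fun i => 4 * i * i)

-- ===== PRECONDITION & SPEC =====
def Spec_generate_series (n : Int) (out : List Int) : Prop := out = generate_series_alt n
instance (n : Int) (out : List Int) : Decidable (Spec_generate_series n out) := by unfold Spec_generate_series; infer_instance

-- ===== CLAIM (what is proved, stated in full; the proofs are below) =====
def Claim_equal_generate_series : Prop := ∀ (n : Int), Dom_generate_series n → Spec_generate_series n (generate_series n)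

-- ===== LEMMAS AND PROOFS =====

-- binary search keeps the invariant lo² ≤ m < hi² and ends with hi = lo + 1
theorem isqrtLoop_spec (fuel : Nat) : ∀ (m lo hi : Int), lo * lo ≤ m → m < hi * hi →
    lo < hi → (hi - lo).toNat ≤ fuel →
    isqrtLoop fuel m lo hi * isqrtLoop fuel m lo hi ≤ m ∧
      m < (isqrtLoop fuel m lo hi + 1) * (isqrtLoop fuel m lo hi + 1) := by
  induction fuel with
  | zero => intro m lo hi h1 h2 h3 h4; omega
  | succ f ih =>
    intro m lo hi h1 h2 h3 h4
    simp only [isqrtLoop]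
    by_cases hlt : lo + 1 < hi
    · have hmid := PySem.Int.floordiv_two_mid_bounds (lo := lo) (hi := hi) (le_of_lt h3)
      set mid := PySem.Int.floordiv (lo + hi) 2 with hm
      -- mid is strictly between lo and hi
      have hmid2 : lo < mid ∧ mid < hi := by
        constructor
        · have : lo + 1 ≤ mid := by
            have := PySem.Int.le_floordiv_iff_mul_le (a := lo + hi) (b := 2) (q := lo + 1) (by norm_num)
            rw [← hm] at this; omega
          omega
        · have : mid ≤ hi - 1 := by
            have := PySem.Int.floordiv_lt_iff_lt_mul (a := lo + hi) (b := 2) (q := hi) (by norm_num)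
            rw [← hm] at this; omega
          omega
      simp only [hlt, if_true]
      by_cases hsq : mid * mid ≤ m
      · simp only [hsq, if_true]
        exact ih m mid hi hsq h2 hmid2.2 (by omega)
      · simp only [hsq, if_false]
        exact ih m lo mid h1 (by omega) hmid2.1 (by omega)
    · simp only [hlt, if_false]
      have heq : hi = lo + 1 := by omega
      subst heq
      exact ⟨h1, h2⟩

-- A's loop, started at i with (2L)² ≤ n < (2(L+1))², appends exactly the terms for i..L
theorem genLoop_eq (fuel : Nat) : ∀ (n i L : Int) (acc : List Int), 1 ≤ i → i ≤ L + 1 →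
    4 * (L * L) ≤ n → n < 4 * ((L + 1) * (L + 1)) → (L + 1 - i).toNat ≤ fuel →
    genLoop fuel n i acc = acc ++ (PySem.List.pyRange i (L + 1) 1).map (fun j => (2 * j) ^ 2) := by
  induction fuel with
  | zero =>
    intro n i L acc h1 h2 h3 h4 h5
    have hi : L + 1 ≤ i := by omega
    simp [genLoop, PySem.List.pyRange_one_eq_nil hi]
  | succ f ih =>
    intro n i L acc h1 h2 h3 h4 h5
    simp only [genLoop]
    by_cases hiL : i ≤ L
    · have hterm : ¬ ((2 * i) ^ 2 > n) := by nlinarith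
      simp only [hterm, if_false]
      rw [ih n (i + 1) L (acc ++ [(2 * i) ^ 2]) (by omega) (by omega) h3 h4 (by omega)]
      rw [PySem.List.pyRange_one_cons (by omega : i < L + 1)]
      simp
    · have hi : i = L + 1 := by omega
      have hterm : (2 * i) ^ 2 > n := by subst hi; nlinarith
      simp [hterm, PySem.List.pyRange_one_eq_nil (by omega : L + 1 ≤ i)]

-- ===== VERDICT (by name: the statement is the Claim_ definition above) =====
theorem generate_series_spec : Claim_equal_generate_series := by
  intro n _
  unfold Spec_generate_series generate_series generate_series_alt
  by_cases hn : n < 4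
  · -- one loop step: the first term 4 already exceeds n
    simp [genLoop, hn]
  · simp only [hn, if_false]
    set m := PySem.Int.floordiv n 4 with hmdef
    have hm : 4 * m ≤ n ∧ n < 4 * m + 4 := by
      have := PySem.Int.floordiv_eq_ediv_of_pos (a := n) (b := 4) (by norm_num)
      rw [← hmdef] at this; omega
    have hm1 : 1 ≤ m := by omega
    set r := isqrtLoop (m.toNat + 1) m 1 (m + 1) with hrdef
    have hr := isqrtLoop_spec (m.toNat + 1) m 1 (m + 1) (by omega)
      (by nlinarith) (by omega) (by omega)
    rw [← hrdef] at hr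
    have hr0 : 0 ≤ r := by nlinarith
    have hrn : r ≤ n := by nlinarith
    rw [genLoop_eq (n.toNat + 1) n 1 r [] (by omega) (by omega)
      (by nlinarith) (by nlinarith) (by omega)]
    have hfun : (fun j : Int => (2 * j) ^ 2) = (fun j : Int => 4 * j * j) := by
      funext j; ring
    simp [hfun]
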